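-- pv_equiv track=rewrite | github.com/HeangMapanha/homework_8_collab_Panha | exercise-5.py | reverse_ascending
-- ===== SOURCE A (Python) =====
-- def reverse_ascending(items):
--     if not items:
--         return []
--
--     result = []
--     current = [items[0]]
--
--     for i in range(1, len(items)):
--         if items[i] > current[-1]:
--             current.append(items[i])
--         else:
--             result.extend(reversed(current))
--             current = [items[i]]
--
--     result.extend(reversed(current))
--     return result
-- ===== SOURCE B (Python) =====
-- def reverse_ascending(items):
--     # Scan the REVERSED input, grouping it into maximal strictly-descending runs
--     # (these are exactly the original ascending runs, already in reversed element
--     # order); then emit the collected runs in reverse order, each run as-is.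
--     runs = []
--     cur = []
--     for x in reversed(items):
--         if cur and x >= cur[-1]:
--             runs.append(cur)
--             cur = [x]
--         else:
--             cur.append(x)
--     if cur:
--         runs.append(cur)
--     out = []
--     for run in reversed(runs):
--         out.extend(run)
--     return out
-- ===== Notes on version B (the rewrite author's own statement) =====
-- stated objective: alternative
-- what changed: Instead of A's forward scan that reverses each ascending run as it is flushed, B scans the REVERSED input grouping it into maximal strictly-descending runs (which are the original ascending runs already reversed) and then concatenates the collected runs in reverse order, never reversing a run itself.
import Mathlib
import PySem

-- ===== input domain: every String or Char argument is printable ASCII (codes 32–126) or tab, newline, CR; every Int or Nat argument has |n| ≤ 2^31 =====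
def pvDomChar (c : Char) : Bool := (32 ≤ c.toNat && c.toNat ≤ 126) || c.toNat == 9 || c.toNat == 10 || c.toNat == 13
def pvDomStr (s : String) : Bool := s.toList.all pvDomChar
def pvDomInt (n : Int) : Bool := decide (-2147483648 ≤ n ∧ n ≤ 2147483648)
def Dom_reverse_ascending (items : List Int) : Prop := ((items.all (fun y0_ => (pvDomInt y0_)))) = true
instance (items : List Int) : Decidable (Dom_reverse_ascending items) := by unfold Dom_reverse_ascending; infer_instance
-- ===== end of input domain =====

-- B replaces A's forward scan (reverse each ascending run as it is flushed) by a scan of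
-- the REVERSED input into maximal strictly-descending runs, emitted in reverse run order
-- with no run ever reversed. Alternative structure, same O(n) cost.

-- ===== PORT A =====
-- A: fold over items[1:] carrying (result, current); current is nonempty, in Python order;
-- current[-1] is ported as getLast!.
def reverse_ascending (items : List Int) : List Int :=
  match items with
  | [] => []
  | x :: rest =>
    let st := rest.foldl
      (fun (st : List Int × List Int) it =>
        if it > st.2.getLast! then (st.1, st.2 ++ [it])
        else (st.1 ++ st.2.reverse, [it]))
      ([], [x])
    st.1 ++ st.2.reverse

-- ===== PORT B =====
-- first loop: for x in reversed(items): flush cur into runs when cur and x >= cur[-1].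
def bStep (st : List (List Int) × List Int) (x : Int) : List (List Int) × List Int :=
  if !st.2.isEmpty && st.2.getLast! ≤ x then (st.1 ++ [st.2], [x])
  else (st.1, st.2 ++ [x])

def reverse_ascending_alt (items : List Int) : List Int :=
  let st := items.reverse.foldl bStep ([], [])
  let runs := if !st.2.isEmpty then st.1 ++ [st.2] else st.1
  -- second loop: for run in reversed(runs): out.extend(run)
  runs.reverse.foldl (fun out run => out ++ run) []

-- ===== PRECONDITION & SPEC =====
def Spec_reverse_ascending (items : List Int) (out : List Int) : Prop := out = reverse_ascending_alt items
instance (items : List Int) (out : List Int) : Decidable (Spec_reverse_ascending items out) := by unfold Spec_reverse_ascending; infer_instance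

-- ===== CLAIM (what is proved, stated in full; the proofs are below) =====
def Claim_equal_reverse_ascending : Prop := ∀ (items : List Int), Dom_reverse_ascending items → Spec_reverse_ascending items (reverse_ascending items)

-- ===== LEMMAS AND PROOFS =====

-- Proof-side bridge: the maximal strictly-ascending continuation of `prev` at the front
-- of xs, and the run-by-run recursion both programs compute.
def takeRunB (prev : Int) : List Int → List Int × List Int
  | [] => ([], [])
  | x :: xs =>
    if x > prev then
      let p := takeRunB x xs
      (x :: p.1, p.2)
    else ([], x :: xs)

theorem takeRunB_rest_le : ∀ (prev : Int) (xs : List Int), (takeRunB prev xs).2.length ≤ xs.length := by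
  intro prev xs
  induction xs generalizing prev with
  | nil => simp [takeRunB]
  | cons x xs ih =>
    simp only [takeRunB]
    split
    · exact Nat.le_succ_of_le (ih x)
    · simp

def altRuns : List Int → List Int
  | [] => []
  | x :: xs =>
    let p := takeRunB x xs
    (x :: p.1).reverse ++ altRuns p.2
termination_by items => items.length
decreasing_by
  simpa using Nat.lt_succ_of_le (takeRunB_rest_le x xs)

theorem altRuns_cons (x : Int) (xs : List Int) :
    altRuns (x :: xs) =
      (x :: (takeRunB x xs).1).reverse ++ altRuns (takeRunB x xs).2 := by
  rw [altRuns]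

theorem getLast!_concat : ∀ (l : List Int) (y : Int), (l ++ [y]).getLast! = y := by
  intro l y
  induction l with
  | nil => rfl
  | cons a l ih =>
    cases l with
    | nil => rfl
    | cons b t => simp only [List.getLast!] at ih ⊢; exact ih

-- A's loop invariant: folding A's step over xs from accumulator res and a nonempty current
-- run cur (last element `last`) yields, after the final flush, res, then the reversed
-- completed run, then the run-by-run recursion on the remainder.
theorem fold_invariant : ∀ (xs res cur : List Int) (last : Int), cur ≠ [] → cur.getLast! = last →
    ((xs.foldl
        (fun (st : List Int × List Int) it =>
          if it > st.2.getLast! then (st.1, st.2 ++ [it])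
          else (st.1 ++ st.2.reverse, [it])) (res, cur)).1 ++
     (xs.foldl
        (fun (st : List Int × List Int) it =>
          if it > st.2.getLast! then (st.1, st.2 ++ [it])
          else (st.1 ++ st.2.reverse, [it])) (res, cur)).2.reverse) =
    res ++ ((cur ++ (takeRunB last xs).1).reverse ++ altRuns (takeRunB last xs).2) := by
  intro xs
  induction xs with
  | nil =>
    intro res cur last _ _
    simp [takeRunB, altRuns]
  | cons y ys ih =>
    intro res cur last hne hlast
    simp only [List.foldl_cons, hlast, takeRunB]
    by_cases h : y > last
    · rw [if_pos h, if_pos h]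
      rw [ih res (cur ++ [y]) y (by simp) (getLast!_concat cur y)]
      simp
    · rw [if_neg h, if_neg h]
      rw [ih (res ++ cur.reverse) [y] y (by simp) rfl]
      rw [altRuns_cons]
      simp

theorem A_eq_altRuns (items : List Int) : reverse_ascending items = altRuns items := by
  cases items with
  | nil => simp [reverse_ascending, altRuns]
  | cons x xs =>
    simp only [reverse_ascending]
    rw [fold_invariant xs [] [x] x (by simp) rfl, altRuns_cons]
    simp

-- foldl-extend over a list of runs is the flatten appended to the accumulator.
theorem foldl_extend (l : List (List Int)) : ∀ (acc : List Int),
    l.foldl (fun out run => out ++ run) acc = acc ++ l.flatten := by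
  induction l with
  | nil => simp
  | cons r l ih => intro acc; simp [ih, List.flatten]

-- B's first loop invariant: after processing (x :: xs).reverse, the open run `cur` is the
-- reversed first ascending run of x :: xs, and the flushed runs, read back-to-front and
-- flattened, are the run-by-run recursion on the remainder.
theorem B_fold_inv : ∀ (l : List Int) (x : Int) (xs : List Int), l = x :: xs →
    (l.reverse.foldl bStep ([], [])).2 = (x :: (takeRunB x xs).1).reverse ∧
    (l.reverse.foldl bStep ([], [])).1.reverse.flatten = altRuns (takeRunB x xs).2 := by
  intro l
  induction l with
  | nil => intro x xs h; cases h
  | cons a rest ih =>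
    intro x xs h
    injection h with h1 h2
    subst h1; subst h2
    cases rest with
    | nil => simp [bStep, takeRunB, altRuns]
    | cons y ys =>
      have hstep : ((a :: y :: ys).reverse.foldl bStep ([], [])) =
          bStep ((y :: ys).reverse.foldl bStep ([], [])) a := by
        rw [List.reverse_cons, List.foldl_append, List.foldl_cons, List.foldl_nil]
      obtain ⟨h2, h1⟩ := ih y ys rfl
      have hlast : ((y :: ys).reverse.foldl bStep ([], [])).2.getLast! = y := by
        rw [h2, List.reverse_cons]; exact getLast!_concat _ y
      have hne : ((y :: ys).reverse.foldl bStep ([], [])).2.isEmpty = false := by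
        rw [h2, List.reverse_cons]; simp
      rw [hstep]
      simp only [bStep, hne, hlast, Bool.not_false, Bool.true_and, takeRunB]
      by_cases h : y > a
      · have hy : ¬ y ≤ a := by omega
        rw [if_neg (by simp [hy])]
        simp only [if_pos h]
        exact ⟨by rw [h2]; simp, h1⟩
      · have hy : y ≤ a := by omega
        rw [if_pos (by simp [hy])]
        simp only [if_neg h]
        refine ⟨by simp, ?_⟩
        rw [List.reverse_append, List.reverse_singleton]
        simp only [List.flatten_cons, List.singleton_append]
        rw [h1, h2, altRuns_cons]

theorem B_eq_altRuns (items : List Int) : reverse_ascending_alt items = altRuns items := by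
  cases items with
  | nil => simp [reverse_ascending_alt, altRuns]
  | cons x xs =>
    obtain ⟨h2, h1⟩ := B_fold_inv (x :: xs) x xs rfl
    have hne : ((x :: xs).reverse.foldl bStep ([], [])).2.isEmpty = false := by
      rw [h2, List.reverse_cons]; simp
    simp only [reverse_ascending_alt, hne, Bool.not_false, if_pos]
    rw [foldl_extend]
    rw [List.reverse_append, List.reverse_singleton]
    simp only [List.nil_append, List.flatten_cons, List.singleton_append]
    rw [h1, h2, altRuns_cons]

-- ===== VERDICT (by name: the statement is the Claim_ definition above) =====
theorem reverse_ascending_spec : Claim_equal_reverse_ascending := by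
  intro items _
  unfold Spec_reverse_ascending
  rw [A_eq_altRuns, B_eq_altRuns]
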